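-- pv_equiv track=rewrite | github.com/JannieUwU/DocuMind | backend/app/services/two_level_indexing.py | extractive_summary
-- ===== SOURCE A (Python) =====
-- from typing import List, Dict, Tuple, Optional
--
-- def extractive_summary(
--     chunks: List[str],
--     max_length: int = 500
-- ) -> str:
--     """
--     提取式摘要 (快速,无需LLM)
--
--     策略:
--     - 取每个chunk的第一句
--     - 合并直到达到max_length
--     """
--     sentences = []
--     current_length = 0
--
--     for chunk in chunks:
--         # 提取第一句
--         first_sent = chunk.split('.')[0] + '.'
--         sent_len = len(first_sent)
--
--         if current_length + sent_len <= max_length: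
--             sentences.append(first_sent)
--             current_length += sent_len
--         else:
--             break
--
--     summary = ' '.join(sentences)
--     return summary if summary else chunks[0][:max_length]
-- ===== SOURCE B (Python) =====
-- def extractive_summary(chunks, max_length=500):
--     # Stage 1: first sentence of each chunk.
--     firsts = [c.split('.')[0] + '.' for c in chunks]
--     # Stage 2: prefix character totals.
--     cums = []
--     total = 0
--     for s in firsts:
--         total += len(s)
--         cums.append(total)
--     # Stage 3: binary search for the cutoff k = largest prefix whose total fits
--     # (cums is nondecreasing, so 'cums[i] <= max_length' holds exactly on a prefix).
--     lo, hi = 0, len(cums)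
--     while lo < hi:
--         mid = (lo + hi) // 2
--         if cums[mid] <= max_length:
--             lo = mid + 1
--         else:
--             hi = mid
--     summary = ' '.join(firsts[:lo])
--     return summary if summary else chunks[0][:max_length]
-- ===== Notes on version B (the rewrite author's own statement) =====
-- stated objective: alternative
-- what changed: Replaces A's sequential scan with break by three staged passes: precompute all first sentences and their prefix character totals, then locate the cutoff by binary search over the monotone totals and join that prefix.
-- outside the precondition, e.g. on extractive_summary([], 500): A raises IndexError, B raises IndexError
import Mathlib
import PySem

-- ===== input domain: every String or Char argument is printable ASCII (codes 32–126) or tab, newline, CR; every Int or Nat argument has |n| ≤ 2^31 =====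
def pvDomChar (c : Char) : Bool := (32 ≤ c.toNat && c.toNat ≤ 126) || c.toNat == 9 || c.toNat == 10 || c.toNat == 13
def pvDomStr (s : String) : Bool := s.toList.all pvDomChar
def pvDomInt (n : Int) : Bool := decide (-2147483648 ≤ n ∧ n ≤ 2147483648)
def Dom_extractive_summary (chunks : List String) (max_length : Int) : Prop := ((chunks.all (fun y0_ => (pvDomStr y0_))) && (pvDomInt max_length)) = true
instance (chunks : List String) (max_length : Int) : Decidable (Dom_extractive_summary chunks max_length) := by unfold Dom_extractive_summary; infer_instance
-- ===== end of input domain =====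

-- B replaces A's sequential scan-with-break by staged passes: all first sentences, their
-- prefix character totals, then a binary search for the cutoff over the monotone totals
-- (objective: alternative, same overall cost). Equivalence of the RETURN value is proved on
-- nonempty chunks; on [] both Pythons raise IndexError.

-- ===== PORT A =====
-- chunk.split('.')[0] + '.'
def pvFirstSentA (chunk : String) : String :=
  (((PySem.Str.split? chunk ".").getD []).headD "") ++ "."

-- the for-loop of A: state (current_length, sentences-accumulator in reverse), break = stop
def pvLoopA (max_length : Int) : List String → Int → List String → List String
  | [], _, acc => acc.reverse
  | chunk :: rest, cur, acc =>
    let first_sent := pvFirstSentA chunk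
    let sent_len : Int := PySem.Str.len first_sent
    if cur + sent_len ≤ max_length then
      pvLoopA max_length rest (cur + sent_len) (first_sent :: acc)
    else acc.reverse

def extractive_summary (chunks : List String) (max_length : Int) : String :=
  let sentences := pvLoopA max_length chunks 0 []
  let summary := PySem.Str.join " " sentences
  if summary == "" then
    -- chunks[0][:max_length]; chunks = [] (IndexError) is excluded by Pre_
    PySem.Str.slice ((PySem.List.pyGet? chunks 0).getD "") none (some max_length)
  else summary

-- ===== PORT B =====
def pvFirstSentB (c : String) : String :=
  (((PySem.Str.split? c ".").getD []).headD "") ++ "."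

-- B's stage-2 loop: total += len(s); cums.append(total)
def pvBuildCums (total : Int) : List String → List Int
  | [] => []
  | s :: rest => (total + PySem.Str.len s) :: pvBuildCums (total + PySem.Str.len s) rest

-- B's stage-3 while-loop: binary search for the cutoff.
-- cums[mid] is in range (0 ≤ mid < len), so List.getD transliterates the Python indexing exactly.
-- fuel = hi - lo bounds the iteration count (totality device only; hi - lo shrinks each step)
def pvBisectGo (cums : List Int) (ml : Int) : Nat → Nat → Nat → Nat
  | 0, lo, _ => lo
  | fuel + 1, lo, hi =>
    if lo < hi then
      let mid := (lo + hi) / 2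
      if cums.getD mid 0 ≤ ml then pvBisectGo cums ml fuel (mid + 1) hi
      else pvBisectGo cums ml fuel lo mid
    else lo

def pvBisect (cums : List Int) (ml : Int) (lo hi : Nat) : Nat :=
  pvBisectGo cums ml (hi - lo) lo hi

def extractive_summary_alt (chunks : List String) (max_length : Int) : String :=
  let firsts := chunks.map pvFirstSentB
  let cums := pvBuildCums 0 firsts
  let k := pvBisect cums max_length 0 cums.length
  let summary := PySem.Str.join " " (PySem.List.slice firsts none (some (k : Int)))
  if summary == "" then
    PySem.Str.slice ((PySem.List.pyGet? chunks 0).getD "") none (some max_length)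
  else summary

-- ===== PRECONDITION & SPEC =====
-- Pre_ excludes chunks = [], on which Python A raises IndexError (chunks[0] in the fallback).
def Pre_extractive_summary (chunks : List String) (max_length : Int) : Prop := chunks ≠ []
instance (chunks : List String) (max_length : Int) : Decidable (Pre_extractive_summary chunks max_length) := by unfold Pre_extractive_summary; infer_instance
def pvWitness_extractive_summary : List String × Int := (["Hi there. More text", "Bye."], 30)

def Spec_extractive_summary (chunks : List String) (max_length : Int) (out : String) : Prop := out = extractive_summary_alt chunks max_length
instance (chunks : List String) (max_length : Int) (out : String) : Decidable (Spec_extractive_summary chunks max_length out) := by unfold Spec_extractive_summary; infer_instance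

-- ===== CLAIM (what is proved, stated in full; the proofs are below) =====
def Claim_equal_extractive_summary : Prop := ∀ (chunks : List String) (max_length : Int), Dom_extractive_summary chunks max_length → Pre_extractive_summary chunks max_length → Spec_extractive_summary chunks max_length (extractive_summary chunks max_length)

-- ===== LEMMAS AND PROOFS =====

-- A's loop keeps exactly the sentences whose running total fits (proof-side view)
theorem pvLoopA_eq (ml : Int) (cs : List String) (cur : Int) (acc : List String) :
    pvLoopA ml cs cur acc =
      acc.reverse ++
        (((cs.map pvFirstSentA).zip (pvBuildCums cur (cs.map pvFirstSentA))).takeWhile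
          (fun p => decide (p.2 ≤ ml))).map Prod.fst := by
  induction cs generalizing cur acc with
  | nil => simp [pvLoopA, pvBuildCums]
  | cons c rest ih =>
    rw [pvLoopA, List.map_cons, pvBuildCums, List.zip_cons_cons, List.takeWhile_cons]
    by_cases h : cur + (PySem.Str.len (pvFirstSentA c) : Int) ≤ ml
    · rw [if_pos h, ih]
      have h' : cur + ((pvFirstSentA c).length : Int) ≤ ml := by
        simpa [PySem.Str.len] using h
      simp [h']
    · rw [if_neg h]
      have h' : ¬ cur + ((pvFirstSentA c).length : Int) ≤ ml := by
        simpa [PySem.Str.len] using h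
      simp [h']

-- projecting the zipped takeWhile gives a plain take of the cutoff length
theorem takeWhile_zip_proj (xs : List String) (cs : List Int) (ml : Int)
    (hlen : xs.length = cs.length) :
    ((xs.zip cs).takeWhile (fun p => decide (p.2 ≤ ml))).map Prod.fst =
      xs.take ((cs.takeWhile (fun c => decide (c ≤ ml))).length) := by
  induction xs generalizing cs with
  | nil => simp
  | cons x xs ih =>
    cases cs with
    | nil => simp at hlen
    | cons c cs =>
      simp only [List.zip_cons_cons, List.takeWhile_cons]
      by_cases h : c ≤ ml
      · simp only [h, decide_true, if_true, List.map_cons, List.length_cons, List.take_succ_cons]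
        rw [ih cs (by simpa using hlen)]
      · simp [h]

theorem pvBuildCums_length (t : Int) (xs : List String) :
    (pvBuildCums t xs).length = xs.length := by
  induction xs generalizing t with
  | nil => rfl
  | cons x xs ih => simp [pvBuildCums, ih]

-- prefix totals are nondecreasing (string lengths are nonnegative)
theorem pvBuildCums_mono (t : Int) (xs : List String) (i j : Nat) (hij : i ≤ j)
    (hj : j < (pvBuildCums t xs).length) :
    (pvBuildCums t xs).getD i 0 ≤ (pvBuildCums t xs).getD j 0 := by
  induction xs generalizing t i j with
  | nil => simp [pvBuildCums] at hj
  | cons x xs ih =>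
    cases i with
    | zero =>
      cases j with
      | zero => simp
      | succ j =>
        simp only [pvBuildCums, List.length_cons] at hj ⊢
        simp only [List.getD_cons_zero, List.getD_cons_succ]
        have hle : t + PySem.Str.len x ≤ (pvBuildCums (t + PySem.Str.len x) xs).getD 0 0 := by
          cases xs with
          | nil => simp [pvBuildCums] at hj
          | cons y ys =>
            simp [pvBuildCums, PySem.Str.len]
        calc t + PySem.Str.len x ≤ (pvBuildCums (t + PySem.Str.len x) xs).getD 0 0 := hle
          _ ≤ (pvBuildCums (t + PySem.Str.len x) xs).getD j 0 :=
              ih (t + PySem.Str.len x) 0 j (Nat.zero_le _) (by omega)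
    | succ i =>
      cases j with
      | zero => omega
      | succ j =>
        simp only [pvBuildCums, List.length_cons] at hj ⊢
        simp only [List.getD_cons_succ]
        exact ih (t + PySem.Str.len x) i j (by omega) (by omega)

-- cutoff-length characterisation of takeWhile
theorem takeWhile_length_eq (cs : List Int) (ml : Int) (k : Nat)
    (hk : k ≤ cs.length)
    (h1 : ∀ i, i < k → cs.getD i 0 ≤ ml)
    (h2 : ∀ i, k ≤ i → i < cs.length → ¬ cs.getD i 0 ≤ ml) :
    (cs.takeWhile (fun c => decide (c ≤ ml))).length = k := by
  induction cs generalizing k with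
  | nil => simp at hk ⊢; omega
  | cons c cs ih =>
    cases k with
    | zero =>
      have := h2 0 (Nat.zero_le _) (by simp)
      simp only [List.getD_cons_zero] at this
      simp [this]
    | succ k =>
      have hc : c ≤ ml := by have := h1 0 (Nat.succ_pos _); simpa using this
      simp only [List.takeWhile_cons, hc, decide_true, if_true, List.length_cons]
      rw [ih k (by simpa using hk)
        (fun i hi => by have := h1 (i+1) (by omega); simpa using this)
        (fun i hki hi => by
          have := h2 (i+1) (by omega) (by simpa using Nat.succ_lt_succ hi)
          simpa using this)]

-- binary-search invariant: with the prefix/suffix invariants, pvBisect returns the cutoff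
theorem pvBisect_inv (cs : List Int) (ml : Int)
    (hmono : ∀ i j, i ≤ j → j < cs.length → cs.getD i 0 ≤ cs.getD j 0)
    (lo hi : Nat) (hlohi : lo ≤ hi) (hhi : hi ≤ cs.length)
    (h1 : ∀ i, i < lo → cs.getD i 0 ≤ ml)
    (h2 : ∀ i, hi ≤ i → i < cs.length → ¬ cs.getD i 0 ≤ ml) :
    ∀ fuel, hi - lo ≤ fuel →
    pvBisectGo cs ml fuel lo hi = (cs.takeWhile (fun c => decide (c ≤ ml))).length := by
  intro fuel
  induction fuel generalizing lo hi with
  | zero =>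
    intro hf
    have hlo : lo = hi := by omega
    subst hlo
    exact (takeWhile_length_eq cs ml lo (by omega) h1 h2).symm
  | succ fuel ih =>
    intro hf
    by_cases h : lo < hi
    · rw [pvBisectGo, if_pos h]
      set mid := (lo + hi) / 2 with hmid
      have hmlt : mid < hi := by omega
      have hmlen : mid < cs.length := by omega
      by_cases hc : cs.getD mid 0 ≤ ml
      · simp only [hc, if_pos]
        exact ih (mid+1) hi (by omega) hhi
          (fun i hi' => le_trans (hmono i mid (by omega) hmlen) hc) h2 (by omega)
      · simp only [hc, ite_false]
        exact ih lo mid (by omega) (by omega) h1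
          (fun i hmi hi' => fun hle => hc (le_trans (hmono mid i hmi hi') hle)) (by omega)
    · rw [pvBisectGo, if_neg h]
      have hlo : lo = hi := by omega
      subst hlo
      exact (takeWhile_length_eq cs ml lo (by omega) h1 h2).symm

theorem pvBisect_eq (cs : List Int) (ml : Int)
    (hmono : ∀ i j, i ≤ j → j < cs.length → cs.getD i 0 ≤ cs.getD j 0) :
    pvBisect cs ml 0 cs.length = (cs.takeWhile (fun c => decide (c ≤ ml))).length :=
  pvBisect_inv cs ml hmono 0 cs.length (Nat.zero_le _) le_rfl
    (fun i hi => absurd hi (Nat.not_lt_zero i))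
    (fun i hi hlt => absurd hlt (by omega)) (cs.length - 0) le_rfl

theorem extractive_summary_eq_alt (chunks : List String) (max_length : Int) :
    extractive_summary chunks max_length = extractive_summary_alt chunks max_length := by
  have key : pvLoopA max_length chunks 0 [] =
      PySem.List.slice (chunks.map pvFirstSentB) none
        (some ((pvBisect (pvBuildCums 0 (chunks.map pvFirstSentB)) max_length 0
          (pvBuildCums 0 (chunks.map pvFirstSentB)).length : Nat) : Int)) := by
    have hfs : pvFirstSentB = pvFirstSentA := rfl
    rw [hfs, pvLoopA_eq, List.reverse_nil, List.nil_append,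
      takeWhile_zip_proj _ _ _ (pvBuildCums_length 0 _).symm,
      PySem.List.slice_to_natCast,
      pvBisect_eq _ max_length (pvBuildCums_mono 0 (chunks.map pvFirstSentA))]
  simp only [extractive_summary, extractive_summary_alt, key]

-- ===== VERDICT (by name: the statement is the Claim_ definition above) =====
theorem extractive_summary_spec : Claim_equal_extractive_summary := by
  intro chunks max_length _ _
  unfold Spec_extractive_summary
  exact extractive_summary_eq_alt chunks max_length
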